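-- pv_equiv track=rewrite | github.com/guojinyu88/DICE_DST | utils/multiWoZUtils.py | getPositionOfAnswer
-- ===== SOURCE A (Python) =====
-- def getPositionOfAnswer(sentencesTokens_idx:list, sentencesMask:list, answerTokens_idx:list):
--     '''
--         给定输入模型的idx序列、哪里里是句子的标识、需要抽取的slot的idx的序列
--
--         return：
--         slot的起始位置  -1, -1 为未找到相应的slot value的位置
--
--
--     '''
--     fast = 0
--     for slow in range(len(sentencesMask)):
--         if sentencesMask[slow] == 0: # 不是句子的地方不允许抽取
--             continue
--         fast = slow
--         index = 0
--         while sentencesTokens_idx[fast] == answerTokens_idx[index]: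
--             fast += 1
--             index += 1
--             if index >= len(answerTokens_idx): # answer全部对上了
--                 return slow, fast-1
--
--
--     return -1, -1 # 未找到满足要求的子串
-- ===== SOURCE B (Python) =====
-- def getPositionOfAnswer(sentencesTokens_idx: list, sentencesMask: list, answerTokens_idx: list):
--     # Rabin-Karp: one pass precomputes a rolling hash (base 2**33, digits shifted
--     # by 2**31, mod the Mersenne prime 2**61-1) for every length-m window; then a
--     # single scan of the mask returns the leftmost nonzero-mask start whose window
--     # hash equals the answer's hash and (verification of the rare hash hit)
--     # whose window slice equals the answer.
--     n, m = len(sentencesTokens_idx), len(answerTokens_idx)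
--     OFF, BASE, MOD = 1 << 31, 1 << 33, (1 << 61) - 1
--     target = 0
--     for x in answerTokens_idx:
--         target = (target * BASE + (x + OFF)) % MOD
--     H = []
--     if m <= n:
--         h = 0
--         for x in sentencesTokens_idx[:m]:
--             h = (h * BASE + (x + OFF)) % MOD
--         H.append(h)
--         P = pow(BASE, m - 1, MOD) if m > 0 else 0
--         for i in range(n - m):
--             h = ((h - (sentencesTokens_idx[i] + OFF) * P) * BASE
--                  + (sentencesTokens_idx[i + m] + OFF)) % MOD
--             H.append(h)
--     for i, flag in enumerate(sentencesMask):
--         if flag != 0 and i < len(H) and H[i] == target \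
--                 and sentencesTokens_idx[i:i + m] == answerTokens_idx:
--             return i, i + m - 1
--     return -1, -1
-- ===== Notes on version B (the rewrite author's own statement) =====
-- stated objective: alternative
-- what changed: A rescans the answer at every candidate position with a fast/index two-pointer walk; B is Rabin-Karp: one pass precomputes a rolling window hash (base 2^33, digits shifted by 2^31, mod the Mersenne prime 2^61-1), then a single scan of the mask returns the leftmost nonzero-mask start whose hash equals the answer's hash, verifying the rare hash hit with one slice comparison.
import Mathlib
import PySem

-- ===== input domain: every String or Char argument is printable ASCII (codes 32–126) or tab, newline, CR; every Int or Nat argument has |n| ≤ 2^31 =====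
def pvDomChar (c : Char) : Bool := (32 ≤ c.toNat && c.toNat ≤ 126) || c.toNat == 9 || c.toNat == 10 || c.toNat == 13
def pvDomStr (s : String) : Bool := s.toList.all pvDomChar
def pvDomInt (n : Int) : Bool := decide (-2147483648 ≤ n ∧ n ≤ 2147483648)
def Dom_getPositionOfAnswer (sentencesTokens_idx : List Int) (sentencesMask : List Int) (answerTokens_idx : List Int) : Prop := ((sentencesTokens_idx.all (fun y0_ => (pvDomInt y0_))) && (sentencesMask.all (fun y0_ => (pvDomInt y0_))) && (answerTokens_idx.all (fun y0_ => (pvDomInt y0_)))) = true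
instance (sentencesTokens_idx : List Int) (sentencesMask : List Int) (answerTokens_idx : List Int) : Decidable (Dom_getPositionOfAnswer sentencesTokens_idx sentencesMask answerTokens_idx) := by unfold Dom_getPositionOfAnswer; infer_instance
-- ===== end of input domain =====

-- B replaces A's per-position fast/index rescan by Rabin-Karp: rolling window hashes built in
-- one pass, then one scan of the mask picks the leftmost allowed hash hit, verified by a slice
-- comparison; objective: alternative algorithm.

-- ===== PORT A =====
-- the inner while loop: fast/index walk.  Where the Python raises IndexError
-- (pyGet? = none), the port returns none; those inputs are excluded by Pre_.
def aWhile (tokens answer : List Int) (slow fast index : Nat) : Option (Nat × Nat) :=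
  match PySem.List.pyGet? tokens (fast : Int), PySem.List.pyGet? answer (index : Int) with
  | some t, some a =>
    if t = a then
      if index + 1 ≥ answer.length then some (slow, fast)  -- Python returns (slow, fast-1) after fast += 1
      else aWhile tokens answer slow (fast + 1) (index + 1)
    else none
  | _, _ => none
termination_by answer.length - index
decreasing_by omega

-- the outer for-loop over range(len(sentencesMask))
def aLoop (tokens mask answer : List Int) (slow : Nat) : Int × Int :=
  if h : slow < mask.length then
    if mask[slow] = 0 then aLoop tokens mask answer (slow + 1)
    else
      match aWhile tokens answer slow slow 0 with
      | some (s, f) => ((s : Int), (f : Int))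
      | none => aLoop tokens mask answer (slow + 1)
  else (-1, -1)
termination_by mask.length - slow

def getPositionOfAnswer (sentencesTokens_idx : List Int) (sentencesMask : List Int) (answerTokens_idx : List Int) : Int × Int :=
  aLoop sentencesTokens_idx sentencesMask answerTokens_idx 0

-- ===== PORT B =====
def pvOFF : Int := 2147483648        -- 1 << 31
def pvBASE : Int := 8589934592       -- 1 << 33
def pvMOD : Int := 2305843009213693951   -- (1 << 61) - 1

-- one hash digestion step: h = (h*BASE + (x+OFF)) % MOD  (positive modulus: Lean's % = Python's %)
def hStep : Int → Int → Int := fun h x => (h * pvBASE + (x + pvOFF)) % pvMOD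

-- the H-building block of Source B: hash of tokens[:m] ("for x in tokens[:m]"), then the rolling
-- loop "for i in range(n-m)" appending one hash per window; P = pow(BASE, m-1, MOD).
-- tokens.getD is exact for tokens[i] here: both indices are in range throughout the loop.
def buildH (tokens : List Int) (m : Nat) : List Int :=
  if m ≤ tokens.length then
    let h0 := (tokens.take m).foldl hStep 0
    let P : Int := if 0 < m then pvBASE ^ (m - 1) % pvMOD else 0
    ((List.range (tokens.length - m)).foldl
      (fun (st : Int × List Int) i =>
        let h' := ((st.1 - (tokens.getD i 0 + pvOFF) * P) * pvBASE
                    + (tokens.getD (i + m) 0 + pvOFF)) % pvMOD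
        (h', st.2 ++ [h']))
      (h0, [h0])).2
  else []

-- the final "for i, flag in enumerate(mask)" scan with slice verification of a hash hit
def bFind (tokens answer : List Int) (H : List Int) (target : Int) (i : Nat) (maskRest : List Int) : Option Nat :=
  match maskRest with
  | [] => none
  | flag :: rest =>
    if flag ≠ 0 ∧ i < H.length ∧ H.getD i 0 = target ∧
        PySem.List.slice tokens (some (i : Int)) (some ((i : Int) + (answer.length : Int))) = answer
    then some i
    else bFind tokens answer H target (i + 1) rest

def getPositionOfAnswer_alt (sentencesTokens_idx : List Int) (sentencesMask : List Int) (answerTokens_idx : List Int) : Int × Int :=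
  match bFind sentencesTokens_idx answerTokens_idx
              (buildH sentencesTokens_idx answerTokens_idx.length)
              (answerTokens_idx.foldl hStep 0) 0 sentencesMask with
  | none => (-1, -1)
  | some i => ((i : Int), (i : Int) + (answerTokens_idx.length : Int) - 1)

-- ===== PRECONDITION & SPEC =====
-- Pre_ excludes exactly the inputs on which A raises IndexError: a nonzero mask position whose
-- matching scan runs past the end of the tokens (in particular any nonzero mask with an empty
-- answer) that is not preceded by a nonzero mask position where the full answer matches.
def Pre_getPositionOfAnswer (sentencesTokens_idx : List Int) (sentencesMask : List Int) (answerTokens_idx : List Int) : Prop :=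
  ∀ slow < sentencesMask.length,
    sentencesMask.getD slow 0 ≠ 0 →
    (answerTokens_idx = [] ∨ (sentencesTokens_idx.drop slow <+: answerTokens_idx ∧ sentencesTokens_idx.length - slow < answerTokens_idx.length)) →
    ∃ s' < slow, sentencesMask.getD s' 0 ≠ 0 ∧ answerTokens_idx ≠ [] ∧
      answerTokens_idx <+: sentencesTokens_idx.drop s'

instance (sentencesTokens_idx : List Int) (sentencesMask : List Int) (answerTokens_idx : List Int) : Decidable (Pre_getPositionOfAnswer sentencesTokens_idx sentencesMask answerTokens_idx) := by unfold Pre_getPositionOfAnswer; exact Nat.decidableBallLT _ _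

def pvWitness_getPositionOfAnswer : List Int × List Int × List Int := ([5, 7, 9], [0, 1, 1], [7, 9])

def Spec_getPositionOfAnswer (sentencesTokens_idx : List Int) (sentencesMask : List Int) (answerTokens_idx : List Int) (out : Int × Int) : Prop := out = getPositionOfAnswer_alt sentencesTokens_idx sentencesMask answerTokens_idx
instance (sentencesTokens_idx : List Int) (sentencesMask : List Int) (answerTokens_idx : List Int) (out : Int × Int) : Decidable (Spec_getPositionOfAnswer sentencesTokens_idx sentencesMask answerTokens_idx out) := by unfold Spec_getPositionOfAnswer; infer_instance

-- ===== CLAIM (what is proved, stated in full; the proofs are below) =====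
def Claim_equal_getPositionOfAnswer : Prop := ∀ (sentencesTokens_idx : List Int) (sentencesMask : List Int) (answerTokens_idx : List Int), Dom_getPositionOfAnswer sentencesTokens_idx sentencesMask answerTokens_idx → Pre_getPositionOfAnswer sentencesTokens_idx sentencesMask answerTokens_idx → Spec_getPositionOfAnswer sentencesTokens_idx sentencesMask answerTokens_idx (getPositionOfAnswer sentencesTokens_idx sentencesMask answerTokens_idx)

-- ===== LEMMAS AND PROOFS =====

-- the modulus-free hash of a list, for reasoning about the rolling update
def pStep : Int → Int → Int := fun h x => h * pvBASE + (x + pvOFF)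
def hashL (l : List Int) : Int := l.foldl pStep 0

-- the specification-side find: first index with nonzero flag where answer prefixes tokens.drop i
def specFind (tokens answer : List Int) (i : Nat) (maskRest : List Int) : Option Nat :=
  match maskRest with
  | [] => none
  | flag :: rest =>
    if flag ≠ 0 ∧ answer <+: tokens.drop i then some i
    else specFind tokens answer (i + 1) rest

theorem foldl_hash (l : List Int) : ∀ a : Int, l.foldl pStep a = a * pvBASE ^ l.length + hashL l := by
  induction l with
  | nil => intro a; simp [hashL]
  | cons x t ih =>
    intro a
    have h1 := ih (pStep a x)
    have h2 := ih (pStep 0 x)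
    simp only [List.foldl_cons, hashL] at *
    rw [h1, h2]
    simp only [pStep, List.length_cons]
    ring

theorem hashL_cons (x : Int) (t : List Int) :
    hashL (x :: t) = (x + pvOFF) * pvBASE ^ t.length + hashL t := by
  have := foldl_hash t (pStep 0 x)
  simp only [hashL, List.foldl_cons] at *
  rw [this]; simp [pStep]

theorem hashL_concat (l : List Int) (x : Int) :
    hashL (l ++ [x]) = hashL l * pvBASE + (x + pvOFF) := by
  simp [hashL, List.foldl_append, pStep]

-- the moded fold computes the pure hash mod pvMOD
theorem foldl_mod (l : List Int) : ∀ a : Int, l.foldl hStep (a % pvMOD) = (l.foldl pStep a) % pvMOD := by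
  induction l with
  | nil => intro a; simp
  | cons x t ih =>
    intro a
    simp only [List.foldl_cons, hStep, pStep]
    have hcong : ((a % pvMOD) * pvBASE + (x + pvOFF)) % pvMOD
        = (a * pvBASE + (x + pvOFF)) % pvMOD :=
      Int.ModEq.add_right (x + pvOFF)
        (Int.ModEq.mul_right pvBASE (Int.emod_emod_of_dvd a dvd_rfl))
    rw [hcong]
    exact ih (a * pvBASE + (x + pvOFF))

theorem hashM_eq (l : List Int) : l.foldl hStep 0 = hashL l % pvMOD := by
  have : (0 : Int) = 0 % pvMOD := by norm_num [pvMOD]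
  rw [this, foldl_mod]
  rfl

-- dropping the inner mods of the rolling update does not change the result mod pvMOD
theorem roll_mod (X d e Q : Int) :
    ((X % pvMOD - d * (Q % pvMOD)) * pvBASE + e) % pvMOD
      = ((X - d * Q) * pvBASE + e) % pvMOD :=
  Int.ModEq.add_right e
    (Int.ModEq.mul_right pvBASE
      (Int.ModEq.sub (Int.emod_emod_of_dvd X dvd_rfl)
        (Int.ModEq.mul_left d (Int.emod_emod_of_dvd Q dvd_rfl))))

-- the rolling-update identity (modulus-free)
theorem roll_step (tokens : List Int) (m i : Nat) (hm : 1 ≤ m) (h : i + m < tokens.length) :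
    hashL ((tokens.drop (i + 1)).take m)
      = (hashL ((tokens.drop i).take m) - (tokens.getD i 0 + pvOFF) * pvBASE ^ (m - 1)) * pvBASE
        + (tokens.getD (i + m) 0 + pvOFF) := by
  obtain ⟨mm, rfl⟩ : ∃ mm, m = mm + 1 := ⟨m - 1, by omega⟩
  have hi : i < tokens.length := by omega
  have him : i + mm + 1 < tokens.length := by omega
  have hdrop : tokens.drop i = tokens[i] :: tokens.drop (i + 1) := List.drop_eq_getElem_cons hi
  have hmidlen : ((tokens.drop (i + 1)).take mm).length = mm := by
    simp [List.length_take, List.length_drop]; omega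
  have hwin : (tokens.drop i).take (mm + 1) = tokens[i] :: (tokens.drop (i + 1)).take mm := by
    rw [hdrop]; rfl
  have hget : (tokens.drop (i + 1))[mm]? = some tokens[i + mm + 1] := by
    rw [List.getElem?_drop]
    have e : i + 1 + mm = i + mm + 1 := by omega
    rw [e]
    exact List.getElem?_eq_getElem him
  have hwin' : (tokens.drop (i + 1)).take (mm + 1)
      = (tokens.drop (i + 1)).take mm ++ [tokens[i + mm + 1]] := by
    rw [List.take_add_one, hget]; rfl
  have hgd1 : tokens.getD i 0 = tokens[i] := List.getD_eq_getElem _ _ hi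
  have hgd2 : tokens.getD (i + (mm + 1)) 0 = tokens[i + mm + 1] := by
    have : i + (mm + 1) = i + mm + 1 := by omega
    rw [this]; exact List.getD_eq_getElem _ _ him
  rw [hwin, hwin', hashL_cons, hashL_concat, hmidlen, hgd1, hgd2]
  have hmm : mm + 1 - 1 = mm := by omega
  rw [hmm]
  ring

-- the rolling fold builds exactly the per-window hashes (each = pure hash mod pvMOD)
theorem roll_inv (tokens : List Int) (m : Nat) (hm : 1 ≤ m) (hmn : m ≤ tokens.length) :
    ∀ k, k ≤ tokens.length - m →
      (List.range k).foldl
        (fun (st : Int × List Int) i =>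
          let h' := ((st.1 - (tokens.getD i 0 + pvOFF) * (if 0 < m then pvBASE ^ (m - 1) % pvMOD else 0)) * pvBASE
                      + (tokens.getD (i + m) 0 + pvOFF)) % pvMOD
          (h', st.2 ++ [h']))
        ((tokens.take m).foldl hStep 0, [(tokens.take m).foldl hStep 0])
      = (hashL ((tokens.drop k).take m) % pvMOD,
         (List.range (k + 1)).map (fun i => hashL ((tokens.drop i).take m) % pvMOD)) := by
  intro k
  induction k with
  | zero =>
    intro _
    simp [List.range_succ, hashM_eq]
  | succ k ih =>
    intro hk
    rw [List.range_succ, List.foldl_append, ih (by omega)]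
    simp only [List.foldl_cons, List.foldl_nil, if_pos (by omega : 0 < m)]
    have hstep : ((hashL ((tokens.drop k).take m) % pvMOD
          - (tokens.getD k 0 + pvOFF) * (pvBASE ^ (m - 1) % pvMOD)) * pvBASE
          + (tokens.getD (k + m) 0 + pvOFF)) % pvMOD
        = hashL ((tokens.drop (k + 1)).take m) % pvMOD := by
      rw [roll_mod, ← roll_step tokens m k hm (by omega)]
    simp only [List.getD] at hstep
    simp only [Prod.mk.injEq, List.getD]
    refine ⟨hstep, ?_⟩
    rw [List.range_succ (n := k + 1), List.map_append]
    simp [hstep]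

theorem buildH_eq (tokens : List Int) (m : Nat) (hm : 1 ≤ m) (hmn : m ≤ tokens.length) :
    buildH tokens m
      = (List.range (tokens.length - m + 1)).map (fun i => hashL ((tokens.drop i).take m) % pvMOD) := by
  unfold buildH
  rw [if_pos hmn]
  have := roll_inv tokens m hm hmn (tokens.length - m) (le_refl _)
  simp only at this ⊢
  rw [this]

-- B's per-candidate test says exactly "answer is a prefix of tokens.drop i"
theorem find_cond (tokens answer : List Int) (hm : 1 ≤ answer.length) (i : Nat) :
    (i < (buildH tokens answer.length).length ∧
      (buildH tokens answer.length).getD i 0 = hashL answer % pvMOD ∧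
      (tokens.drop i).take answer.length = answer)
    ↔ answer <+: tokens.drop i := by
  constructor
  · rintro ⟨-, -, hslice⟩
    rw [← hslice]
    exact List.take_prefix _ _
  · intro hp
    have htake : answer = (tokens.drop i).take answer.length :=
      List.prefix_iff_eq_take.mp hp
    have hlen2 : answer.length ≤ tokens.length - i := by
      have := hp.length_le
      simpa [List.length_drop] using this
    have hmn : answer.length ≤ tokens.length := by omega
    have hi : i < tokens.length - answer.length + 1 := by omega
    rw [buildH_eq tokens answer.length hm hmn]
    refine ⟨by simpa using hi, ?_, htake.symm⟩
    rw [List.getD_eq_getElem _ _ (by simpa using hi)]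
    simp only [List.getElem_map, List.getElem_range]
    rw [← htake]

theorem bFind_eq_specFind (tokens answer : List Int) (hm : 1 ≤ answer.length) :
    ∀ (maskRest : List Int) (i : Nat),
      bFind tokens answer (buildH tokens answer.length) (hashL answer % pvMOD) i maskRest
        = specFind tokens answer i maskRest := by
  intro maskRest
  induction maskRest with
  | nil => intro i; rfl
  | cons flag rest ih =>
    intro i
    rw [bFind, specFind]
    have hsl : PySem.List.slice tokens (some (i : Int)) (some ((i : Int) + (answer.length : Int)))
        = (tokens.drop i).take answer.length := PySem.List.slice_natCast_add tokens i answer.length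
    have hc := find_cond tokens answer hm i
    by_cases hf : flag ≠ 0 ∧ answer <+: tokens.drop i
    · obtain ⟨h1, h2, h3⟩ := hc.mpr hf.2
      rw [if_pos ⟨hf.1, h1, h2, by rw [hsl]; exact h3⟩, if_pos hf]
    · rw [if_neg (by rintro ⟨h1, h2, h3, h4⟩; rw [hsl] at h4; exact hf ⟨h1, hc.mp ⟨h2, h3, h4⟩⟩),
        if_neg hf, ih]

theorem bFind_none (tokens answer H : List Int) (t : Int) :
    ∀ (maskRest : List Int) (i : Nat), (∀ x ∈ maskRest, x = 0) → bFind tokens answer H t i maskRest = none := by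
  intro maskRest
  induction maskRest with
  | nil => intro i _; rfl
  | cons flag rest ih =>
    intro i hz
    rw [bFind, if_neg (by rintro ⟨h1, -⟩; exact h1 (hz flag List.mem_cons_self)),
      ih (i + 1) (fun x hx => hz x (List.mem_cons_of_mem _ hx))]

theorem specFind_none (tokens answer : List Int) :
    ∀ (maskRest : List Int) (i : Nat), (∀ x ∈ maskRest, x = 0) → specFind tokens answer i maskRest = none := by
  intro maskRest
  induction maskRest with
  | nil => intro i _; rfl
  | cons flag rest ih =>
    intro i hz
    rw [specFind, if_neg (by rintro ⟨h1, -⟩; exact h1 (hz flag List.mem_cons_self)),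
      ih (i + 1) (fun x hx => hz x (List.mem_cons_of_mem _ hx))]

-- characterisation of the inner while loop
theorem aWhile_eq (tokens answer : List Int) (slow : Nat) : ∀ (k fast index : Nat), answer.length - index ≤ k →
    aWhile tokens answer slow fast index =
      if index < answer.length ∧ answer.drop index <+: tokens.drop fast
      then some (slow, fast + (answer.length - index) - 1) else none := by
  intro k
  induction k with
  | zero =>
    intro fast index hk
    have h2 : answer[index]? = none := List.getElem?_eq_none (by omega)
    rw [aWhile.eq_def]
    simp only [PySem.List.pyGet?_natCast, h2]
    have : ¬ index < answer.length := by omega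
    simp [this]
  | succ k ih =>
    intro fast index hk
    rw [aWhile.eq_def]
    simp only [PySem.List.pyGet?_natCast]
    cases h2 : answer[index]? with
    | none =>
      have hidx : answer.length ≤ index := List.getElem?_eq_none_iff.mp h2
      have : ¬ index < answer.length := by omega
      simp [this]
    | some a =>
      obtain ⟨hidx, ha⟩ := List.getElem?_eq_some_iff.mp h2
      have hda : answer.drop index = answer[index] :: answer.drop (index + 1) :=
        List.drop_eq_getElem_cons hidx
      cases h1 : tokens[fast]? with
      | none =>
        have hfast : tokens.length ≤ fast := List.getElem?_eq_none_iff.mp h1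
        have hdrop : tokens.drop fast = [] := List.drop_eq_nil_of_le hfast
        have hne : answer.drop index ≠ [] := by
          simp [List.drop_eq_nil_iff]; omega
        have hnp : ¬ (index < answer.length ∧ answer.drop index <+: tokens.drop fast) := by
          rintro ⟨-, hp⟩
          rw [hdrop] at hp
          exact hne (List.prefix_nil.mp hp)
        simp [hnp]
      | some t =>
        obtain ⟨hfast, ht⟩ := List.getElem?_eq_some_iff.mp h1
        have hdt : tokens.drop fast = tokens[fast] :: tokens.drop (fast + 1) :=
          List.drop_eq_getElem_cons hfast
        by_cases heq : t = a
        · by_cases hlast : index + 1 ≥ answer.length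
          · have hdone : answer.drop (index + 1) = [] := List.drop_eq_nil_of_le (by omega)
            have hp : answer.drop index <+: tokens.drop fast := by
              rw [hda, hdt, hdone]
              exact List.cons_prefix_cons.mpr ⟨by rw [ha, ht]; exact heq.symm, List.nil_prefix⟩
            have harith : fast + (answer.length - index) - 1 = fast := by omega
            simp only [heq, if_pos hlast, if_pos (And.intro hidx hp), harith, if_pos trivial]
          · have hiff : (index + 1 < answer.length ∧ answer.drop (index+1) <+: tokens.drop (fast+1))
                ↔ (index < answer.length ∧ answer.drop index <+: tokens.drop fast) := by
              constructor
              · rintro ⟨h3, h4⟩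
                refine ⟨by omega, ?_⟩
                rw [hda, hdt]
                exact List.cons_prefix_cons.mpr ⟨by rw [ha, ht]; exact heq.symm, h4⟩
              · rintro ⟨h3, h4⟩
                rw [hda, hdt] at h4
                have h5 := (List.cons_prefix_cons.mp h4).2
                exact ⟨by omega, h5⟩
            simp only [heq, if_neg hlast, if_pos trivial]
            rw [ih (fast + 1) (index + 1) (by omega)]
            by_cases hcond : index < answer.length ∧ answer.drop index <+: tokens.drop fast
            · rw [if_pos (hiff.mpr hcond), if_pos hcond]
              have harith : fast + 1 + (answer.length - (index + 1)) - 1 = fast + (answer.length - index) - 1 := by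
                have := (hiff.mpr hcond).1
                omega
              rw [harith]
            · rw [if_neg (fun h => hcond (hiff.mp h)), if_neg hcond]
        · have hnp : ¬ (index < answer.length ∧ answer.drop index <+: tokens.drop fast) := by
            rintro ⟨-, hp⟩
            rw [hda, hdt] at hp
            exact heq (by rw [← ht, ← ha]; exact ((List.cons_prefix_cons.mp hp).1).symm)
          simp [heq, hnp]

-- the outer loop agrees with the find-first-allowed-match, provided the empty answer meets only zero mask
theorem aLoop_eq (tokens mask answer : List Int)
    (h0 : answer = [] → ∀ j < mask.length, mask.getD j 0 = 0) :
    ∀ (k slow : Nat), mask.length - slow ≤ k →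
      aLoop tokens mask answer slow =
        (match specFind tokens answer slow (mask.drop slow) with
         | none => ((-1 : Int), (-1 : Int))
         | some i => ((i : Int), (i : Int) + (answer.length : Int) - 1)) := by
  intro k
  induction k with
  | zero =>
    intro slow hk
    have hge : mask.length ≤ slow := by omega
    rw [aLoop.eq_def, dif_neg (by omega), List.drop_eq_nil_of_le hge]
    simp [specFind]
  | succ k ih =>
    intro slow hk
    by_cases h : slow < mask.length
    · have hdm : mask.drop slow = mask[slow] :: mask.drop (slow + 1) :=
        List.drop_eq_getElem_cons h
      rw [aLoop.eq_def, dif_pos h, hdm]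
      rw [specFind]
      by_cases hz : mask[slow] = 0
      · rw [if_pos hz, ih (slow + 1) (by omega)]
        rw [if_neg (by simp [hz])]
      · rw [if_neg hz]
        have hne : answer ≠ [] := by
          intro hnil
          exact hz (h0 hnil slow h ▸ (List.getD_eq_getElem mask 0 h).symm ▸ rfl)
        have hpos : 0 < answer.length := List.length_pos_iff.mpr hne
        rw [aWhile_eq tokens answer slow (answer.length) slow 0 (by omega)]
        by_cases hmatch : answer <+: tokens.drop slow
        · rw [if_pos ⟨hpos, by simpa using hmatch⟩]
          rw [if_pos ⟨hz, hmatch⟩]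
          simp
          omega
        · rw [if_neg (by simpa using fun h1 h2 => hmatch h2)]
          rw [if_neg (by rintro ⟨-, hc⟩; exact hmatch hc)]
          exact ih (slow + 1) (by omega)
    · have hge : mask.length ≤ slow := by omega
      rw [aLoop.eq_def, dif_neg h, List.drop_eq_nil_of_le hge]
      simp [specFind]

-- ===== VERDICT (by name: the statement is the Claim_ definition above) =====
theorem getPositionOfAnswer_spec : Claim_equal_getPositionOfAnswer := by
  unfold Claim_equal_getPositionOfAnswer Spec_getPositionOfAnswer
  intro tokens mask answer _hdom hpre
  have h0 : answer = [] → ∀ j < mask.length, mask.getD j 0 = 0 := by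
    intro hnil j hj
    by_contra hz
    obtain ⟨-, -, -, hne, -⟩ := hpre j hj hz (Or.inl hnil)
    exact hne hnil
  unfold getPositionOfAnswer getPositionOfAnswer_alt
  rw [aLoop_eq tokens mask answer h0 mask.length 0 (by omega), List.drop_zero]
  by_cases hm : answer.length = 0
  · have hnil : answer = [] := List.length_eq_zero_iff.mp hm
    have hz : ∀ x ∈ mask, x = 0 := by
      intro x hx
      obtain ⟨j, hj, rfl⟩ := List.mem_iff_getElem.mp hx
      rw [← List.getD_eq_getElem mask 0 hj]
      exact h0 hnil j hj
    rw [specFind_none tokens answer mask 0 hz, bFind_none tokens answer _ _ mask 0 hz]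
  · have hm1 : 1 ≤ answer.length := by omega
    rw [hashM_eq answer, bFind_eq_specFind tokens answer hm1 mask 0]
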